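-- pv_equiv track=rewrite | github.com/DornelesArthur/simplex-calculator | calc.py | invertSign
-- ===== SOURCE A (Python) =====
-- def invertSign(function):
--     func = ""
--     for x in range(len(function)):
--         if x == 0:
--             if function[x] == "-":
--                 func += "+"
--             elif function[x] == "+":
--                 func += "-"
--             else:
--                 func += "-" + function[x]
--         elif(function[x] == "+"):
--             func += "-"
--         elif(function[x] == "-"):
--             func += "+"
--         else:
--             func += function[x]
--     return func
-- ===== SOURCE B (Python) =====
-- def invertSign(function):
--     # Split-and-rejoin: the text between signs is untouched; swapping the signs
--     # is done by splitting on '+' (and, inside each piece, on '-') and joining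
--     # the pieces back with the opposite delimiters.
--     swapped = '-'.join('+'.join(part.split('-')) for part in function.split('+'))
--     if function and function[0] not in '+-':
--         swapped = '-' + swapped
--     return swapped
-- ===== Notes on version B (the rewrite author's own statement) =====
-- stated objective: alternative
-- what changed: Replaces A's index-special-cased per-character loop with a split-and-rejoin algorithm: split the string on '+' and each piece on '-', rejoin with the opposite delimiters, and prepend the implicit leading '-' only when the first character is not a sign.
import Mathlib
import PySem

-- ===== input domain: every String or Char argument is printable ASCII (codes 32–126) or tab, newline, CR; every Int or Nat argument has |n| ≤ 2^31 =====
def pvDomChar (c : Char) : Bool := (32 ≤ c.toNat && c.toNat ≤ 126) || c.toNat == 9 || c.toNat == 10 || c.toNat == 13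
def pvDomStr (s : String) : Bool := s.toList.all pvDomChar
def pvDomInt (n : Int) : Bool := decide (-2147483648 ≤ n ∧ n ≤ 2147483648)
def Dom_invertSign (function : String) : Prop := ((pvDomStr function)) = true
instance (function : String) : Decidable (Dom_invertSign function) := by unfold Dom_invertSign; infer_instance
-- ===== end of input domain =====

-- B replaces A's index-special-cased character loop by a split-and-rejoin algorithm
-- (split on '+', split each piece on '-', rejoin with the opposite delimiters,
-- prepend the implicit leading '-' when the first character is not a sign); alternative, no speed claim.

-- ===== PORT A =====
-- loop body of A's 'for x in range(len(function))' (func and the result kept as List Char)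
def pvBodyA (cs : List Char) (func : List Char) (x : Int) : List Char :=
  let c := PySem.List.pyGetD cs x ' '   -- index x is always in range here
  if x = 0 then
    if c == '-' then func ++ ['+']
    else if c == '+' then func ++ ['-']
    else func ++ ['-', c]
  else if c == '+' then func ++ ['-']
  else if c == '-' then func ++ ['+']
  else func ++ [c]

def invertSign (function : String) : String :=
  let cs := function.toList
  ((PySem.List.pyRange 0 cs.length 1).foldl (pvBodyA cs) []).asString

-- ===== PORT B =====
-- Source B: swapped = '-'.join('+'.join(part.split('-')) for part in function.split('+'))
def invertSign_alt (function : String) : String :=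
  let cs := function.toList
  let swapped :=
    PySem.Chars.join ['-']
      ((PySem.Chars.splitOn cs ['+']).map
        (fun part => PySem.Chars.join ['+'] (PySem.Chars.splitOn part ['-'])))
  let swapped :=
    match cs with
    | [] => swapped
    | c :: _ => if PySem.Chars.isIn [c] ['+', '-'] then swapped else '-' :: swapped
  swapped.asString

-- ===== PRECONDITION & SPEC =====
def Spec_invertSign (function : String) (out : String) : Prop := out = invertSign_alt function
instance (function : String) (out : String) : Decidable (Spec_invertSign function out) := by unfold Spec_invertSign; infer_instance

-- ===== CLAIM (what is proved, stated in full; the proofs are below) =====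
def Claim_equal_invertSign : Prop := ∀ (function : String), Dom_invertSign function → Spec_invertSign function (invertSign function)

-- ===== LEMMAS AND PROOFS =====

-- the character-level sign swap both programs effect on all but the first position
def pvSwap (c : Char) : Char := if c == '+' then '-' else if c == '-' then '+' else c

-- A's loop from index k ≥ 1 onward appends exactly the sign-swapped tail
theorem pvTailFold (cs : List Char) : ∀ (k : Nat) (acc : List Char), 1 ≤ k →
    (PySem.List.pyRange (k : Int) (cs.length : Int) 1).foldl (pvBodyA cs) acc
      = acc ++ (cs.drop k).map pvSwap := by
  intro k acc hk
  by_cases h : k < cs.length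
  · rw [PySem.List.pyRange_one_cons (by exact_mod_cast h)]
    have hget : PySem.List.pyGetD cs (k : Int) ' ' = cs[k] := by
      simp [PySem.List.pyGetD_natCast, List.getD_eq_getElem?_getD, h]
    have hbody : pvBodyA cs acc (k : Int) = acc ++ [pvSwap cs[k]] := by
      unfold pvBodyA pvSwap
      rw [hget]
      have hk0 : (k : Int) ≠ 0 := by exact_mod_cast Nat.one_le_iff_ne_zero.mp hk
      simp only [if_neg hk0]
      by_cases h1 : cs[k] = '+' <;> by_cases h2 : cs[k] = '-' <;> simp [h1, h2]
    rw [List.foldl_cons, hbody]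
    have hrec := pvTailFold cs (k + 1) (acc ++ [pvSwap cs[k]]) (by omega)
    rw [show ((k : Int) + 1) = ((k + 1 : Nat) : Int) by push_cast; ring] at *
    rw [hrec]
    rw [List.drop_eq_getElem_cons h]
    simp only [List.map_cons, List.append_assoc, List.singleton_append]
  · rw [PySem.List.pyRange_one_eq_nil (by exact_mod_cast Nat.le_of_not_lt h)]
    simp [List.drop_eq_nil_of_le (Nat.le_of_not_lt h)]
termination_by k => cs.length - k

-- PySem's fuelled splitOn on a one-character separator is Mathlib's splitOnP
theorem pvGoSplit (a : Char) : ∀ (l : List Char) (fuel : Nat) (cur : List Char) (acc : List (List Char)),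
    l.length ≤ fuel →
    PySem.Chars.splitOn.go [a] fuel l cur acc
      = acc.reverse ++ (List.splitOnP (· == a) l).modifyHead (cur.reverse ++ ·) := by
  intro l
  induction l with
  | nil =>
    intro fuel cur acc _
    cases fuel <;> simp [PySem.Chars.splitOn.go.eq_def, List.splitOnP_nil]
  | cons c rest ih =>
    intro fuel cur acc hf
    match fuel, hf with
    | fuel + 1, hf =>
      simp only [List.length_cons, Nat.add_le_add_iff_right] at hf
      rw [PySem.Chars.splitOn.go.eq_def]
      simp only []
      by_cases hc : c = a
      · have hpre : List.isPrefixOf [a] (c :: rest) = true := by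
          simp [List.isPrefixOf, hc]
        rw [if_pos hpre]
        have hdrop1 : List.drop [a].length (c :: rest) = rest := rfl
        rw [hdrop1]
        rw [ih fuel [] (cur.reverse :: acc) hf]
        rw [List.splitOnP_cons]
        simp [hc]
        obtain ⟨h, t, hht⟩ : ∃ h t, List.splitOnP (· == a) rest = h :: t :=
          List.exists_cons_of_ne_nil (List.splitOnP_ne_nil _ _)
        rw [hht]
        simp [List.modifyHead]
      · have hpre : List.isPrefixOf [a] (c :: rest) = false := by
          simp [List.isPrefixOf]; exact fun h => absurd h.symm hc
        rw [if_neg (by simp [hpre])]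
        rw [ih fuel (c :: cur) acc (by omega)]
        rw [List.splitOnP_cons]
        have hca : (c == a) = false := by simp [hc]
        rw [hca]
        simp only [if_neg (by simp : ¬ false = true)]
        congr 1
        obtain ⟨h, t, hht⟩ : ∃ h t, List.splitOnP (· == a) rest = h :: t :=
          List.exists_cons_of_ne_nil (List.splitOnP_ne_nil _ _)
        rw [hht]
        simp [List.modifyHead]

theorem pvSplitOn_single (a : Char) (cs : List Char) :
    PySem.Chars.splitOn cs [a] = List.splitOnP (· == a) cs := by
  unfold PySem.Chars.splitOn
  rw [pvGoSplit a cs (cs.length + 1) [] [] (by omega)]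
  obtain ⟨h, t, hht⟩ : ∃ h t, List.splitOnP (· == a) cs = h :: t :=
    List.exists_cons_of_ne_nil (List.splitOnP_ne_nil _ _)
  rw [hht]; simp [List.modifyHead]

-- intercalate through a modifyHead-cons (the split lists are never empty)
theorem pvIntercalate_modifyHead (sep : List Char) (x : Char) (L : List (List Char)) (hL : L ≠ []) :
    sep.intercalate (L.modifyHead (x :: ·)) = x :: sep.intercalate L := by
  obtain ⟨h, t, rfl⟩ := List.exists_cons_of_ne_nil hL
  cases t <;> simp [List.modifyHead, List.intercalate, List.intersperse]

theorem pvIntercalate_cons_of_ne_nil (sep : List Char) (x : List Char) (t : List (List Char)) (ht : t ≠ []) :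
    sep.intercalate (x :: t) = x ++ sep ++ sep.intercalate t := by
  obtain ⟨h, t', rfl⟩ := List.exists_cons_of_ne_nil ht
  simp [List.intercalate, List.intersperse]

-- the inner '+'.join(part.split('-')) step
def pvInner (p : List Char) : List Char :=
  List.intercalate ['+'] (List.splitOnP (· == '-') p)

-- the split-and-rejoin chain equals the character-level swap
theorem pvChain (cs : List Char) :
    List.intercalate ['-'] ((List.splitOnP (· == '+') cs).map pvInner) = cs.map pvSwap := by
  induction cs with
  | nil => simp [List.splitOnP_nil, pvInner, List.intercalate, List.intersperse]
  | cons c rest ih =>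
    rw [List.splitOnP_cons]
    by_cases hp : c = '+'
    · rw [if_pos (by simp [hp])]
      rw [List.map_cons]
      have hinner : pvInner [] = [] := by
        simp [pvInner, List.splitOnP_nil, List.intercalate, List.intersperse]
      rw [hinner]
      rw [pvIntercalate_cons_of_ne_nil _ _ _ (by
        simp only [ne_eq, List.map_eq_nil_iff]
        exact List.splitOnP_ne_nil _ _)]
      rw [ih]
      simp [hp, pvSwap]
    · rw [if_neg (by simp [hp])]
      obtain ⟨h, t, hht⟩ : ∃ h t, List.splitOnP (· == '+') rest = h :: t :=
        List.exists_cons_of_ne_nil (List.splitOnP_ne_nil _ _)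
      rw [hht]
      rw [hht, List.map_cons] at ih
      simp only [List.modifyHead, List.map_cons]
      have hinner : pvInner (c :: h) = pvSwap c :: pvInner h := by
        unfold pvInner
        rw [List.splitOnP_cons]
        by_cases hm : c = '-'
        · rw [if_pos (by simp [hm])]
          rw [pvIntercalate_cons_of_ne_nil _ _ _ (List.splitOnP_ne_nil _ _)]
          simp [hm, pvSwap]
        · rw [if_neg (by simp [hm])]
          rw [pvIntercalate_modifyHead _ _ _ (List.splitOnP_ne_nil _ _)]
          simp [pvSwap, hp, hm]
      rw [hinner]
      have hmh := pvIntercalate_modifyHead ['-'] (pvSwap c) (pvInner h :: List.map pvInner t) (by simp)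
      simp only [List.modifyHead] at hmh
      rw [hmh, ih]

-- ===== VERDICT (by name: the statement is the Claim_ definition above) =====
theorem invertSign_spec : Claim_equal_invertSign := by
  intro function _
  unfold Spec_invertSign invertSign invertSign_alt
  simp only [PySem.Chars.join, pvSplitOn_single]
  cases hcs : function.toList with
  | nil => simp [PySem.List.pyRange_one_eq_nil, List.splitOnP_nil, List.intercalate]
  | cons c rest =>
    have hB := pvChain (c :: rest)
    unfold pvInner at hB
    -- A's side
    rw [show (0 : Int) = ((0 : Nat) : Int) from rfl]
    rw [PySem.List.pyRange_one_cons (by simp)]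
    rw [List.foldl_cons]
    have hbody0 : pvBodyA (c :: rest) [] ((0 : Nat) : Int) =
        (if c = '-' then ['+'] else if c = '+' then ['-'] else ['-', c]) := by
      unfold pvBodyA
      simp only [Nat.cast_zero, PySem.List.pyGetD_zero_cons]
      by_cases h1 : c = '-' <;> by_cases h2 : c = '+' <;> simp [h1, h2]
    rw [hbody0]
    rw [show ((0 : Nat) : Int) + 1 = ((1 : Nat) : Int) by norm_num]
    rw [pvTailFold (c :: rest) 1 _ le_rfl]
    have hdrop : (c :: rest).drop 1 = rest := rfl
    rw [hdrop]
    rw [hB]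
    by_cases h1 : c = '-'
    · have hIn1 : PySem.Chars.isIn ['-'] ['+', '-'] = true := by decide
      simp [h1, pvSwap, hIn1]
    · by_cases h2 : c = '+'
      · have hIn2 : PySem.Chars.isIn ['+'] ['+', '-'] = true := by decide
        simp [h2, pvSwap, hIn2]
      · have hInf : PySem.Chars.isIn [c] ['+', '-'] = false := by
          rw [PySem.Chars.isIn_eq_false_iff]
          intro hinf
          have hc' := hinf.sublist.subset (List.mem_singleton_self c)
          rcases List.mem_cons.mp hc' with h | h
          · exact h2 h
          · exact h1 (List.mem_singleton.mp h)
        simp [h1, h2, pvSwap, hInf]
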